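-- pv_equiv track=rewrite | github.com/skilldeliver/skillreceiving | Hack Bulgaria/Programming101Python 2018/week01/01. FirstStepsIntoPython - Solutions.py | fib_num
-- ===== SOURCE A (Python) =====
-- def fib_num(n):
--     arr = []
--     string = ""
--
--     for i in range(0, n):
--         if i == 0 or i == 1: arr.append(1 + 0)
--         else: arr.append(arr[len(arr) - 1] + arr[len(arr) - 2])
--
--     for el in arr:
--         string += str(el)
--     return string
-- ===== SOURCE B (Python) =====
-- def fib_num(n):
--     parts = []
--     a, b = 1, 1
--     for _ in range(n):
--         parts.append(str(a))
--         a, b = b, a + b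
--     return "".join(parts)
-- ===== Notes on version B (the rewrite author's own statement) =====
-- stated objective: simpler
-- what changed: Single pass with two running scalars a,b emitting str(a) directly, instead of building the full Fibonacci list by indexing its last two elements and then concatenating in a second loop.
import Mathlib
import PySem

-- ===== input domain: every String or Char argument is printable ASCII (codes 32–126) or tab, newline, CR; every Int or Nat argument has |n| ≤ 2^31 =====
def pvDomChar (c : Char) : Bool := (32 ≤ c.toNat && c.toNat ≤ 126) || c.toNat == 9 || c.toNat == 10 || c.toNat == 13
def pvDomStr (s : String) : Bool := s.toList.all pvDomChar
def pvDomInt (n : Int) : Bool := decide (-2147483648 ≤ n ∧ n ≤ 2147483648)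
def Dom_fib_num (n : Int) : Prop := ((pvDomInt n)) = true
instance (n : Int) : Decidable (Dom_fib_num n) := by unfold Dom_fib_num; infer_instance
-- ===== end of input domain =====

-- B replaces A's two passes (build the full Fibonacci list by indexing its last two
-- elements, then concatenate in a second loop) by one pass over two running scalars;
-- objective: simpler.

-- ===== PORT A =====
-- arr[len(arr)-1] / arr[len(arr)-2]: indices are always in range when reached (i ≥ 2),
-- so the total pyGetD form is exact here.
def fib_num (n : Int) : String :=
  (((PySem.List.pyRange 0 n 1).foldl
    (fun arr i =>
      if i == 0 || i == 1 then arr ++ [1 + 0]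
      else arr ++ [PySem.List.pyGetD arr ((arr.length : Int) - 1) 0 +
                   PySem.List.pyGetD arr ((arr.length : Int) - 2) 0])
    ([] : List Int)).foldl (fun s el => s ++ PySem.Int.toStr el) "")

-- ===== PORT B =====
-- the loop body of Source B: emit str(a), then (a, b) := (b, a + b); k = iterations left
def fibAltLoop : Nat → Int → Int → List String
  | 0, _, _ => []
  | k + 1, a, b => PySem.Int.toStr a :: fibAltLoop k b (a + b)

def fib_num_alt (n : Int) : String := PySem.Str.join "" (fibAltLoop n.toNat 1 1)

-- ===== PRECONDITION & SPEC =====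
def Spec_fib_num (n : Int) (out : String) : Prop := out = fib_num_alt n
instance (n : Int) (out : String) : Decidable (Spec_fib_num n out) := by unfold Spec_fib_num; infer_instance

-- ===== CLAIM (what is proved, stated in full; the proofs are below) =====
def Claim_equal_fib_num : Prop := ∀ (n : Int), Dom_fib_num n → Spec_fib_num n (fib_num n)

-- ===== LEMMAS AND PROOFS =====

-- the mathematical Fibonacci sequence both programs compute (1, 1, 2, 3, ...)
def fibI : Nat → Int
  | 0 => 1
  | 1 => 1
  | k + 2 => fibI k + fibI (k + 1)

-- A's first loop builds exactly the Fibonacci list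
theorem fibA_arr (m : Nat) :
    ((List.range m).map (fun k : Nat => (k : Int))).foldl
      (fun arr i =>
        if i == 0 || i == 1 then arr ++ [1 + 0]
        else arr ++ [PySem.List.pyGetD arr ((arr.length : Int) - 1) 0 +
                     PySem.List.pyGetD arr ((arr.length : Int) - 2) 0])
      ([] : List Int) = (List.range m).map fibI := by
  induction m with
  | zero => simp
  | succ m ih =>
    simp only [List.range_succ, List.map_append, List.foldl_append, ih,
      List.map_cons, List.map_nil, List.foldl_cons, List.foldl_nil]
    match m with
    | 0 => simp [fibI]
    | 1 => simp [fibI]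
    | k + 2 =>
      have h1 : (((List.range (k+2)).map fibI).length : Int) - 1 = ((k + 1 : Nat) : Int) := by
        simp; omega
      have h2 : (((List.range (k+2)).map fibI).length : Int) - 2 = ((k : Nat) : Int) := by
        simp
      rw [h1, h2, PySem.List.pyGetD_natCast, PySem.List.pyGetD_natCast]
      have hg1 : ((List.range (k+2)).map fibI).getD (k+1) 0 = fibI (k+1) := by
        rw [List.getD_eq_getElem _ _ (by simp)]; simp
      have hg2 : ((List.range (k+2)).map fibI).getD k 0 = fibI k := by
        rw [List.getD_eq_getElem _ _ (by simp)]; simp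
      rw [hg1, hg2]
      have : ((k : Int) + 2 == 0 || (k : Int) + 2 == 1) = false := by
        simp; omega
      simp only [Nat.cast_add, Nat.cast_ofNat, this, Bool.false_eq_true, if_false]
      have : fibI (k + 2) = fibI (k + 1) + fibI k := by
        show fibI k + fibI (k+1) = _; ring
      rw [this]

-- B's loop, started at consecutive Fibonacci values, emits their string forms
theorem fibAltLoop_eq (k : Nat) : ∀ j, fibAltLoop k (fibI j) (fibI (j + 1)) =
    (List.range k).map (fun i => PySem.Int.toStr (fibI (j + i))) := by
  induction k with
  | zero => intro j; simp [fibAltLoop]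
  | succ k ih =>
    intro j
    have hb : fibI j + fibI (j + 1) = fibI (j + 1 + 1) := rfl
    rw [List.range_succ_eq_map]
    simp only [fibAltLoop, hb, ih (j + 1), List.map_cons, List.map_map]
    congr 1
    refine List.map_congr_left fun a _ => ?_
    simp only [Function.comp_apply]
    congr 2
    omega

-- joining with the empty separator is plain flattening
theorem flatten_intersperse_nil : ∀ (l : List (List Char)),
    (List.intersperse ([] : List Char) l).flatten = l.flatten
  | [] => rfl
  | [_] => rfl
  | x :: y :: xs => by
    rw [List.intersperse_cons₂]
    simp [flatten_intersperse_nil (y :: xs)]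

-- string accumulation by ++ equals the flattened char lists
theorem foldl_toStr_toList (L : List Int) : ∀ (s : String),
    (L.foldl (fun s el => s ++ PySem.Int.toStr el) s).toList =
      s.toList ++ (L.map (fun el => (PySem.Int.toStr el).toList)).flatten := by
  induction L with
  | nil => intro s; simp
  | cons x L ih =>
    intro s
    simp only [List.foldl_cons, ih, String.toList_append, List.map_cons, List.flatten_cons,
      List.append_assoc]

-- ===== VERDICT (by name: the statement is the Claim_ definition above) =====
theorem fib_num_spec : Claim_equal_fib_num := by
  intro n _
  unfold Spec_fib_num fib_num fib_num_alt
  apply String.toList_inj.mp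
  rw [PySem.List.pyRange_zero, fibA_arr, foldl_toStr_toList]
  have hB : fibAltLoop n.toNat 1 1 =
      (List.range n.toNat).map (fun i => PySem.Int.toStr (fibI i)) := by
    have := fibAltLoop_eq n.toNat 0
    simpa [fibI] using this
  rw [hB, PySem.Str.toList_join]
  simp only [PySem.Chars.join, List.intercalate, List.map_map,
    show "".toList = [] from rfl]
  rw [flatten_intersperse_nil]
  simp [Function.comp_def, PySem.Int.toList_toStr]
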